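-- pv_equiv track=rewrite | github.com/leto19/mimir | qa/question_answering/models/distilbert_squad_nqa.py | subword_to_whole_word
-- ===== SOURCE A (Python) =====
-- def subword_to_whole_word(tokens):
--
--     if len(tokens) == 0:
--         return ("")
--
--     answer = tokens[0]
--
--     # Select the remaining answer tokens and join them with whitespace.
--     for i in range(1, len(tokens)):
--         # If it's a subword token, then recombine it with the previous token.
--         if len(tokens[i]) >= 2 and tokens[i][0:2] == '##':
--             answer += tokens[i][2:]
--         # Otherwise, add a space then the token.
--         else:
--             answer += ' ' + tokens[i]
--
--     return (answer)
-- ===== SOURCE B (Python) =====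
-- def subword_to_whole_word(tokens):
--     words = []
--     i = 0
--     n = len(tokens)
--     while i < n:
--         # scan the maximal run of '##' continuation tokens completing this word
--         j = i + 1
--         while j < n and tokens[j].startswith('##'):
--             j += 1
--         words.append(tokens[i] + ''.join(t[2:] for t in tokens[i + 1:j]))
--         i = j
--     return ' '.join(words)
-- ===== Notes on version B (the rewrite author's own statement) =====
-- stated objective: alternative
-- what changed: Instead of A's single pass that grows one answer string with a per-token '##' branch, B splits the token list into maximal runs (a word head plus its '##' continuations) with an inner run scan, builds each whole word per run, and joins the word list once at the end.
import Mathlib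
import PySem

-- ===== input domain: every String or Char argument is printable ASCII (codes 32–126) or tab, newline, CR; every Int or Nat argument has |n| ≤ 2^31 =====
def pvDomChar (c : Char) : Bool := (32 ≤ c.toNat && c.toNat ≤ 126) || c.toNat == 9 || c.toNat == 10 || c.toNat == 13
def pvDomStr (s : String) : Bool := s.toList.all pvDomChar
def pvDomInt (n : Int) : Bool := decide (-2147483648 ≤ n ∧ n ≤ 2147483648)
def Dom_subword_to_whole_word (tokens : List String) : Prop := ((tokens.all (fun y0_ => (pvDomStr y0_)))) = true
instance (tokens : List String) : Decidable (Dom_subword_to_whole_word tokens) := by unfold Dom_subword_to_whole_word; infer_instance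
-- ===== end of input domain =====

-- B replaces A's single accumulate-into-one-string pass by a run-splitting scan: split the
-- token list into maximal runs (word head + its '##' continuations), build one word per run,
-- join the words once at the end ('alternative' decomposition, same return value).

-- ===== PORT A =====
def subword_to_whole_word (tokens : List String) : String :=
  match tokens with
  | [] => ""
  | t :: rest =>
    -- answer = tokens[0]; for i in range(1, len(tokens)): ...
    String.ofList (rest.foldl (fun answer tok =>
      if PySem.Chars.len tok.toList ≥ 2 ∧ PySem.Chars.slice tok.toList (some 0) (some 2) = "##".toList then
        answer ++ PySem.Chars.slice tok.toList (some 2) none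
      else
        answer ++ " ".toList ++ tok.toList) t.toList)

-- ===== PORT B =====
-- inner while loop: split off the maximal run of '##' continuation tokens,
-- returning ([t[2:] for t in run], remaining tokens)
def pvRun : List String → List (List Char) × List String
  | [] => ([], [])
  | t :: ts =>
    if PySem.Chars.startswith t.toList "##".toList then
      let p := pvRun ts
      (PySem.Chars.slice t.toList (some 2) none :: p.1, p.2)
    else
      ([], t :: ts)

theorem pvRun_snd_length (ts : List String) : (pvRun ts).2.length ≤ ts.length := by
  induction ts with
  | nil => simp [pvRun]
  | cons t ts ih =>
    simp only [pvRun]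
    split
    · exact Nat.le_succ_of_le ih
    · simp

-- outer while loop: one word per run
def pvWords : List String → List (List Char)
  | [] => []
  | t :: ts =>
    let p := pvRun ts
    (t.toList ++ PySem.Chars.join [] p.1) :: pvWords p.2
  termination_by ts => ts.length
  decreasing_by
    simpa using Nat.lt_succ_of_le (pvRun_snd_length ts)

def subword_to_whole_word_alt (tokens : List String) : String :=
  String.ofList (PySem.Chars.join " ".toList (pvWords tokens))

-- ===== PRECONDITION & SPEC =====
def Spec_subword_to_whole_word (tokens : List String) (out : String) : Prop := out = subword_to_whole_word_alt tokens
instance (tokens : List String) (out : String) : Decidable (Spec_subword_to_whole_word tokens out) := by unfold Spec_subword_to_whole_word; infer_instance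

-- ===== CLAIM (what is proved, stated in full; the proofs are below) =====
def Claim_equal_subword_to_whole_word : Prop := ∀ (tokens : List String), Dom_subword_to_whole_word tokens → Spec_subword_to_whole_word tokens (subword_to_whole_word tokens)

-- ===== LEMMAS AND PROOFS =====

-- A's loop body, named for the lemmas
def pvF (answer : List Char) (tok : String) : List Char :=
  if PySem.Chars.len tok.toList ≥ 2 ∧ PySem.Chars.slice tok.toList (some 0) (some 2) = "##".toList then
    answer ++ PySem.Chars.slice tok.toList (some 2) none
  else
    answer ++ " ".toList ++ tok.toList

-- A's test 'len(t) >= 2 and t[0:2] == "##"' is exactly B's 't.startswith("##")'.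
theorem pv_cond_iff (cs : List Char) :
    (PySem.Chars.len cs ≥ 2 ∧ PySem.Chars.slice cs (some 0) (some 2) = "##".toList)
      ↔ PySem.Chars.startswith cs "##".toList = true := by
  rw [PySem.Chars.startswith_iff]
  simp only [PySem.Chars.len_eq, PySem.Chars.slice_eq_listSlice,
    PySem.List.slice_zero_start, PySem.List.slice_to cs (by norm_num : (0:Int) ≤ 2)]
  constructor
  · rintro ⟨h2, ht⟩
    have : "##".toList = List.take ("##".toList).length cs := by
      simpa using ht.symm
    exact (List.prefix_iff_eq_take).2 this
  · intro hp
    have hl : ("##".toList).length ≤ cs.length := hp.length_le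
    refine ⟨by simpa using hl, ?_⟩
    have := (List.prefix_iff_eq_take).1 hp
    simpa using this.symm

theorem pv_join_nil_cons (x : List Char) (s : List (List Char)) :
    PySem.Chars.join [] (x :: s) = x ++ PySem.Chars.join [] s := by
  cases s with
  | nil => simp [PySem.Chars.join_singleton, PySem.Chars.join_nil]
  | cons y ys => simp [PySem.Chars.join_cons_cons]

-- the run lemma: folding A's body over ts first consumes the '##' run pvRun splits off
theorem pv_run_foldl (ts : List String) :
    ∀ a : List Char, ts.foldl pvF a = (pvRun ts).2.foldl pvF (a ++ PySem.Chars.join [] (pvRun ts).1) := by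
  induction ts with
  | nil => intro a; simp [pvRun, PySem.Chars.join_nil]
  | cons t ts ih =>
    intro a
    by_cases hc : PySem.Chars.startswith t.toList "##".toList = true
    · simp only [pvRun, if_pos hc, List.foldl_cons]
      rw [show pvF a t = a ++ PySem.Chars.slice t.toList (some 2) none from
        by unfold pvF; rw [if_pos ((pv_cond_iff t.toList).2 hc)]]
      rw [ih, pv_join_nil_cons, List.append_assoc]
    · simp only [pvRun, if_neg hc, PySem.Chars.join_nil, List.append_nil]

-- the head of pvRun's remainder is not a '##' token
theorem pv_run_snd_head (ts : List String) (u : String) (more : List String)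
    (h : (pvRun ts).2 = u :: more) : PySem.Chars.startswith u.toList "##".toList = false := by
  induction ts with
  | nil => simp [pvRun] at h
  | cons t ts ih =>
    rw [pvRun] at h
    split at h
    · exact ih h
    · next hc =>
      have h' : t :: ts = u :: more := h
      injection h' with h1 _
      rw [← h1, Bool.eq_false_iff]
      exact hc

-- A's body only ever appends: a common prefix passes through the fold
theorem pv_foldl_prefix (ts : List String) :
    ∀ (p a : List Char), ts.foldl pvF (p ++ a) = p ++ ts.foldl pvF a := by
  induction ts with
  | nil => intro p a; simp
  | cons t ts ih =>
    intro p a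
    have : pvF (p ++ a) t = p ++ pvF a t := by
      unfold pvF; split <;> simp [List.append_assoc]
    simp only [List.foldl_cons, this, ih]

-- main invariant: A's fold from the head token equals the joined word list of B
theorem pv_main : ∀ (n : Nat) (ts : List String), ts.length ≤ n → ∀ (t : String),
    ts.foldl pvF t.toList = PySem.Chars.join " ".toList (pvWords (t :: ts)) := by
  intro n
  induction n with
  | zero =>
    intro ts h t
    have : ts = [] := List.eq_nil_of_length_eq_zero (Nat.le_zero.1 h)
    subst this
    simp [pvWords, pvRun, PySem.Chars.join_singleton, PySem.Chars.join_nil]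
  | succ n ih =>
    intro ts h t
    rw [pv_run_foldl]
    rw [show pvWords (t :: ts) = (t.toList ++ PySem.Chars.join [] (pvRun ts).1) :: pvWords (pvRun ts).2 from by
      rw [pvWords]]
    cases hr : (pvRun ts).2 with
    | nil =>
      simp [pvWords, PySem.Chars.join_singleton]
    | cons u more =>
      have hmore : more.length ≤ n := by
        have := pvRun_snd_length ts
        rw [hr] at this
        simp at this
        omega
      have hu : PySem.Chars.startswith u.toList "##".toList = false := pv_run_snd_head ts u more hr
      have hcond : ¬ (PySem.Chars.len u.toList ≥ 2 ∧ PySem.Chars.slice u.toList (some 0) (some 2) = "##".toList) := by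
        intro hx
        rw [(pv_cond_iff u.toList).1 hx] at hu
        simp at hu
      rw [List.foldl_cons,
        show pvF (t.toList ++ PySem.Chars.join [] (pvRun ts).1) u
            = ((t.toList ++ PySem.Chars.join [] (pvRun ts).1) ++ " ".toList) ++ u.toList from by
          unfold pvF; rw [if_neg hcond],
        pv_foldl_prefix, ih more hmore u]
      have hne : pvWords (u :: more) = (u.toList ++ PySem.Chars.join [] (pvRun more).1) :: pvWords (pvRun more).2 := by
        rw [pvWords]
      rw [hne, PySem.Chars.join_cons_cons, ← hne]

-- ===== VERDICT (by name: the statement is the Claim_ definition above) =====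
theorem subword_to_whole_word_spec : Claim_equal_subword_to_whole_word := by
  intro tokens _
  unfold Spec_subword_to_whole_word subword_to_whole_word subword_to_whole_word_alt
  cases tokens with
  | nil =>
    show ("" : String) = String.ofList (PySem.Chars.join " ".toList (pvWords []))
    rw [pvWords]
    rfl
  | cons t rest =>
    show String.ofList (rest.foldl pvF t.toList)
        = String.ofList (PySem.Chars.join " ".toList (pvWords (t :: rest)))
    rw [pv_main rest.length rest (le_refl _) t]
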